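-- pv_equiv track=rewrite | github.com/adiz50/blowfish_encryption | main.py | divide_hexadecimal
-- ===== SOURCE A (Python) =====
-- def divide_hexadecimal(hex_num):
--     hex_num = hex_num.strip("0x")  # Remove '0x' prefix if present
--     hex_num = hex_num.zfill(8)  # Pad with leading zeros if necessary
--
--     parts = []
--     for i in range(0, 8, 2):
--         part = hex_num[i:i + 2]
--         parts.append(int(part, 16))  # Convert part to integer using base 16
--
--     return parts
-- ===== SOURCE B (Python) =====
-- def divide_hexadecimal(hex_num):
--     s = hex_num.strip("0x").zfill(8)
--     n = 0
--     for c in s[:8]: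
--         n = 16 * n + int(c, 16)
--     return [(n >> 24) & 0xFF, (n >> 16) & 0xFF, (n >> 8) & 0xFF, n & 0xFF]
-- ===== Notes on version B (the rewrite author's own statement) =====
-- stated objective: alternative
-- what changed: Replaces the range(0,8,2) loop that slices four 2-char substrings and parses each with int(part,16) by a single Horner-style fold of the first 8 characters into one 32-bit integer followed by shift/mask byte extraction ((n>>k)&0xFF).
-- outside the precondition, e.g. on divide_hexadecimal('-1-1-1-1'): A returns [-1, -1, -1, -1], B raises ValueError; on divide_hexadecimal(' 7 '): A returns [0, 0, 0, 7], B raises ValueError; on divide_hexadecimal('-1'): A returns [0, 0, 0, 1], B raises ValueError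
import Mathlib
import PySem

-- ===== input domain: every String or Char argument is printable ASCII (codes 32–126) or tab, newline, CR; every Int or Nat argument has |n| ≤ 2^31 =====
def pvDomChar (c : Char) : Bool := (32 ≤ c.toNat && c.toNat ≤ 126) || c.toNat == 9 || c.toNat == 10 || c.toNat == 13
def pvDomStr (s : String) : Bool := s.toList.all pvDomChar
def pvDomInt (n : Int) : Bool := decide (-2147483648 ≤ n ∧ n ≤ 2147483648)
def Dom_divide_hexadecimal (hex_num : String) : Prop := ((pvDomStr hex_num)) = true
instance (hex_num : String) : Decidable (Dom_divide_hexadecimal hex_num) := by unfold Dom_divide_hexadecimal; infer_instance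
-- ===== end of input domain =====

-- B replaces the four-slice/per-pair-int(.,16) loop by a single Horner fold of the first 8
-- characters into one integer and shift/mask byte extraction (alternative algorithm; no speed claim).

-- ===== PORT A =====
def divide_hexadecimal (hex_num : String) : List Int :=
  let h1 := PySem.Str.stripChars hex_num "0x"
  let h2 := PySem.Str.zfill h1 8
  let parts : List Int := (PySem.List.pyRange 0 8 2).foldl
    (fun parts i =>
      let part := PySem.Str.slice h2 (some i) (some (i + 2))
      -- int(part, 16); Pre_ guarantees this parse succeeds, so the default is never used
      parts ++ [(PySem.Int.ofStrBase? part 16).getD 0]) []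
  parts

-- ===== PORT B =====
def divide_hexadecimal_alt (hex_num : String) : List Int :=
  let s := PySem.Str.zfill (PySem.Str.stripChars hex_num "0x") 8
  -- n = 0; for c in s[:8]: n = 16 * n + int(c, 16)   (Pre_ guarantees each parse succeeds)
  let n := (PySem.Str.slice s none (some 8)).toList.foldl
    (fun n c => 16 * n + (PySem.Int.ofCharsBase? [c] 16).getD 0) 0
  [PySem.Int.band (n >>> (24 : Nat)) 255, PySem.Int.band (n >>> (16 : Nat)) 255,
   PySem.Int.band (n >>> (8 : Nat)) 255, PySem.Int.band n 255]

-- ===== PRECONDITION & SPEC =====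
-- Pre_ excludes inputs on which some character among the first 8 of zfill(strip(...)) is not a
-- hex digit: there A either raises ValueError, or (when a 2-char slice only parses through int's
-- whitespace/sign leniency, e.g. '-1' or '0 ') returns an accidental per-pair value while B raises
-- ValueError on the offending single character.
def Pre_divide_hexadecimal (hex_num : String) : Prop :=
  ((PySem.Chars.zfill (PySem.Chars.stripChars hex_num.toList ['0', 'x']) 8).take 8).all
    (fun c => "0123456789abcdefABCDEF".toList.contains c) = true
instance (hex_num : String) : Decidable (Pre_divide_hexadecimal hex_num) := by
  unfold Pre_divide_hexadecimal; infer_instance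

def pvWitness_divide_hexadecimal : String := "1a2B3c4D"

def Spec_divide_hexadecimal (hex_num : String) (out : List Int) : Prop := out = divide_hexadecimal_alt hex_num
instance (hex_num : String) (out : List Int) : Decidable (Spec_divide_hexadecimal hex_num out) := by unfold Spec_divide_hexadecimal; infer_instance

-- ===== CLAIM =====
def Claim_equal_divide_hexadecimal : Prop := ∀ (hex_num : String), Dom_divide_hexadecimal hex_num → Pre_divide_hexadecimal hex_num → Spec_divide_hexadecimal hex_num (divide_hexadecimal hex_num)

-- ===== LEMMAS AND PROOFS =====

-- the characters Pre_ admits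
def pvHexChars : List Char := ['0','1','2','3','4','5','6','7','8','9','a','b','c','d','e','f','A','B','C','D','E','F']

-- value of one hex digit (proof-side bookkeeping only)
def pvHexVal (c : Char) : Int :=
  ((if pvHexChars.idxOf c < 16 then pvHexChars.idxOf c else pvHexChars.idxOf c - 6 : Nat) : Int)

-- int(c, 16) on one admitted character
lemma pv_single_parse (c : Char) (hc : pvHexChars.contains c = true) :
    PySem.Int.ofCharsBase? [c] 16 = some (pvHexVal c) := by
  have hc' : c ∈ pvHexChars := by simpa using hc
  fin_cases hc' <;> decide

lemma pv_val_bounds (c : Char) (hc : pvHexChars.contains c = true) :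
    0 ≤ pvHexVal c ∧ pvHexVal c < 16 := by
  have hc' : c ∈ pvHexChars := by simpa using hc
  fin_cases hc' <;> decide

-- int(a+b, 16) on two admitted characters (A's per-pair parse)
lemma pv_pair_parse (a b : Char) (ha : pvHexChars.contains a = true)
    (hb : pvHexChars.contains b = true) :
    PySem.Int.ofCharsBase? [a, b] 16 = some (16 * pvHexVal a + pvHexVal b) := by
  have ha' : a ∈ pvHexChars := by simpa using ha
  have hb' : b ∈ pvHexChars := by simpa using hb
  fin_cases ha' <;> fin_cases hb' <;> decide

-- (n >> k) & 255 for nonnegative n is n / 2^k % 256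
lemma pv_band255 (m : Int) (hm : 0 ≤ m) : PySem.Int.band m 255 = m % 256 := by
  rw [PySem.Int.band_of_nonneg hm (by norm_num)]
  have h : m.toNat &&& (255 : Int).toNat = m.toNat % 256 := by
    simpa using Nat.and_two_pow_sub_one_eq_mod m.toNat 8
  rw [h]
  omega

theorem divide_hexadecimal_spec : Claim_equal_divide_hexadecimal := by
  unfold Claim_equal_divide_hexadecimal
  intro s _ hpre
  unfold Spec_divide_hexadecimal divide_hexadecimal divide_hexadecimal_alt
  unfold Pre_divide_hexadecimal at hpre
  have hlen : 8 ≤ (PySem.Chars.zfill (PySem.Chars.stripChars s.toList ['0', 'x']) 8).length := by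
    have := PySem.Chars.length_zfill (PySem.Chars.stripChars s.toList ['0', 'x']) (8 : Int)
    omega
  simp only [PySem.Int.ofStrBase?, PySem.Str.toList_slice, PySem.Chars.slice_eq_listSlice,
    PySem.Str.toList_zfill, PySem.Str.toList_stripChars]
  have h0x : "0x".toList = ['0', 'x'] := rfl
  rw [h0x] at *
  generalize hu : PySem.Chars.zfill (PySem.Chars.stripChars s.toList ['0', 'x']) 8 = u at hpre hlen ⊢
  have hrange : PySem.List.pyRange 0 8 2 = [0, 2, 4, 6] := by decide
  rcases u with _|⟨c0,_|⟨c1,_|⟨c2,_|⟨c3,_|⟨c4,_|⟨c5,_|⟨c6,_|⟨c7,u8⟩⟩⟩⟩⟩⟩⟩⟩ <;> simp at hlen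
  simp only [List.take, List.all_cons, List.all_nil, Bool.and_eq_true, and_true] at hpre
  obtain ⟨p0, p1, p2, p3, p4, p5, p6, p7⟩ := hpre
  have e0 : PySem.List.slice (c0::c1::c2::c3::c4::c5::c6::c7::u8) (some (0:Int)) (some ((0:Int)+2)) = [c0, c1] := by
    rw [PySem.List.slice_toNat _ (by norm_num) (by norm_num)]; rfl
  have e2 : PySem.List.slice (c0::c1::c2::c3::c4::c5::c6::c7::u8) (some (2:Int)) (some ((2:Int)+2)) = [c2, c3] := by
    rw [PySem.List.slice_toNat _ (by norm_num) (by norm_num)]; rfl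
  have e4 : PySem.List.slice (c0::c1::c2::c3::c4::c5::c6::c7::u8) (some (4:Int)) (some ((4:Int)+2)) = [c4, c5] := by
    rw [PySem.List.slice_toNat _ (by norm_num) (by norm_num)]; rfl
  have e6 : PySem.List.slice (c0::c1::c2::c3::c4::c5::c6::c7::u8) (some (6:Int)) (some ((6:Int)+2)) = [c6, c7] := by
    rw [PySem.List.slice_toNat _ (by norm_num) (by norm_num)]; rfl
  have eB : PySem.List.slice (c0::c1::c2::c3::c4::c5::c6::c7::u8) none (some (8:Int)) = [c0, c1, c2, c3, c4, c5, c6, c7] := by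
    rw [PySem.List.slice_to _ (by norm_num)]; rfl
  simp only [hrange, List.foldl, e0, e2, e4, e6, eB]
  simp only [pv_pair_parse _ _ p0 p1, pv_pair_parse _ _ p2 p3,
    pv_pair_parse _ _ p4 p5, pv_pair_parse _ _ p6 p7,
    pv_single_parse _ p0, pv_single_parse _ p1, pv_single_parse _ p2, pv_single_parse _ p3,
    pv_single_parse _ p4, pv_single_parse _ p5, pv_single_parse _ p6, pv_single_parse _ p7,
    Option.getD_some, List.nil_append, List.cons_append]
  obtain ⟨l0, h0⟩ := pv_val_bounds _ p0
  obtain ⟨l1, h1⟩ := pv_val_bounds _ p1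
  obtain ⟨l2, h2⟩ := pv_val_bounds _ p2
  obtain ⟨l3, h3⟩ := pv_val_bounds _ p3
  obtain ⟨l4, h4⟩ := pv_val_bounds _ p4
  obtain ⟨l5, h5⟩ := pv_val_bounds _ p5
  obtain ⟨l6, h6⟩ := pv_val_bounds _ p6
  obtain ⟨l7, h7⟩ := pv_val_bounds _ p7
  generalize pvHexVal c0 = v0 at *
  generalize pvHexVal c1 = v1 at *
  generalize pvHexVal c2 = v2 at *
  generalize pvHexVal c3 = v3 at *
  generalize pvHexVal c4 = v4 at *
  generalize pvHexVal c5 = v5 at *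
  generalize pvHexVal c6 = v6 at *
  generalize pvHexVal c7 = v7 at *
  rw [Int.shiftRight_eq_div_pow, Int.shiftRight_eq_div_pow, Int.shiftRight_eq_div_pow]
  rw [pv_band255 _ (by omega), pv_band255 _ (by omega), pv_band255 _ (by omega), pv_band255 _ (by omega)]
  simp only [List.cons.injEq, and_true]
  norm_num
  refine ⟨by omega, by omega, by omega, by omega⟩
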